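-- pv_equiv track=rewrite | github.com/MiltonMaguna/rm2 | render_manager/core/dl_collector_job/collector_jobs.py | list_to_dicts
-- ===== SOURCE A (Python) =====
-- def list_to_dicts(jobs) -> list:
--     """Convert a list of strings to a list of dictionaries.
--
--     Each string in the input list should be in the format 'key=value'.
--     An empty string indicates the end of a dictionary and the start of a new one.
--
--     Args:
--         jobs (list): A list of strings where each string is in the format 'key=value'.
--
--     Returns:
--         list: A list of dictionaries created from the input list of strings.
--     """
--     dicts = []
--     current_dict = {}
--
--     for item in jobs:
--         if item == "":
--             if current_dict:
--                 dicts.append(current_dict)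
--                 current_dict = {}
--         else:
--             key, value = item.split("=", 1)
--             current_dict[key] = value
--
--     if current_dict:
--         dicts.append(current_dict)
--
--     return dicts
-- ===== SOURCE B (Python) =====
-- def list_to_dicts(jobs) -> list:
--     """Two-phase rewrite: locate maximal runs of non-empty strings by index,
--     then build one dict per run from its slice."""
--     result = []
--     i, n = 0, len(jobs)
--     while i < n:
--         if jobs[i] == "":
--             i += 1
--             continue
--         j = i
--         while j < n and jobs[j] != "":
--             j += 1
--         result.append(dict(item.split("=", 1) for item in jobs[i:j]))
--         i = j
--     return result
-- ===== Notes on version B (the rewrite author's own statement) =====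
-- stated objective: alternative
-- what changed: Replaces A's single pass threading a (dicts, current_dict) accumulator with a two-phase index scan: find each maximal run of non-empty strings, then build one dict directly from that slice.
import Mathlib
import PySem

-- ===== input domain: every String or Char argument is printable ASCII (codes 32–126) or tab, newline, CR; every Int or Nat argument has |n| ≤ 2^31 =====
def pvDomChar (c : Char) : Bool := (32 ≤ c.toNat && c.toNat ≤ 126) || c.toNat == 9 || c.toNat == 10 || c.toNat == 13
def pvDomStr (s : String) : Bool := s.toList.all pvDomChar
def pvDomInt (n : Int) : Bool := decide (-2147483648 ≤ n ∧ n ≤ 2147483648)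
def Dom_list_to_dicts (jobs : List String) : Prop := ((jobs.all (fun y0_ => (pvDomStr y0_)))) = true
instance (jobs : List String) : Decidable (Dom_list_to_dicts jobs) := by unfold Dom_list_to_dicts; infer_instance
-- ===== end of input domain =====

-- B replaces A's accumulator-threaded single pass by a run-finding scan plus a dict per run (alternative decomposition, same cost).


-- shared primitive: item.split("=", 1) unpacked into (key, value); exact when '=' occurs in item
-- (Pre_ guarantees that; both Pythons perform exactly this split)
def splitEq (s : String) : String × String :=
  let cs := s.toList
  let i := cs.findIdx (· = '=')
  (String.ofList (cs.take i), String.ofList (cs.drop (i + 1)))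

-- shared primitive: Python dict assignment d[k] = v (overwrite keeps position, new key appends);
-- both Pythons assign into a dict this way (A explicitly, B inside dict(...))
def dinsert (d : List (String × String)) (k v : String) : List (String × String) :=
  if d.any (fun p => p.1 == k) then d.map (fun p => if p.1 == k then (k, v) else p)
  else d ++ [(k, v)]

-- ===== PORT A =====
-- the for-loop of A, carrying the (dicts, current_dict) state
def goA (dicts : List (List (String × String))) (cur : List (String × String)) :
    List String → List (List (String × String))
  | [] => if cur = [] then dicts else dicts ++ [cur]
  | item :: rest =>
    if item = "" then
      if cur = [] then goA dicts cur rest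
      else goA (dicts ++ [cur]) [] rest
    else
      goA dicts (dinsert cur (splitEq item).1 (splitEq item).2) rest

def list_to_dicts (jobs : List String) : List (List (String × String)) :=
  goA [] [] jobs

-- ===== PORT B =====
-- the run predicate jobs[j] != ""
def notEmpty (y : String) : Bool := !(y == "")

-- dict(item.split("=", 1) for item in run): fold the assignments over the slice
def mkDictB (run : List String) : List (String × String) :=
  run.foldl (fun d item => dinsert d (splitEq item).1 (splitEq item).2) []

-- the outer while loop of B: skip a separator, or cut out the maximal non-empty run and recurse past it
def goB : List String → List (List (String × String))
  | [] => []
  | x :: xs =>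
    if x = "" then goB xs
    else mkDictB (x :: xs.takeWhile notEmpty) :: goB (xs.dropWhile notEmpty)
termination_by l => l.length
decreasing_by
  · simp
  · have := List.length_dropWhile_le notEmpty xs
    simp at this ⊢; omega

def list_to_dicts_alt (jobs : List String) : List (List (String × String)) :=
  goB jobs

-- ===== PRECONDITION & SPEC =====
-- Pre_ excludes exactly the inputs where A raises: a non-empty item with no '=' makes
-- `key, value = item.split("=", 1)` raise ValueError in A (and dict(...) raise in B too).
def Pre_list_to_dicts (jobs : List String) : Prop :=
  ∀ s ∈ jobs, s ≠ "" → '=' ∈ s.toList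
instance (jobs : List String) : Decidable (Pre_list_to_dicts jobs) := by
  unfold Pre_list_to_dicts; infer_instance

def pvWitness_list_to_dicts : List String := ["a=1", "b=2", "", "c=3"]

def Spec_list_to_dicts (jobs : List String) (out : List (List (String × String))) : Prop := out = list_to_dicts_alt jobs
instance (jobs : List String) (out : List (List (String × String))) : Decidable (Spec_list_to_dicts jobs out) := by unfold Spec_list_to_dicts; infer_instance

-- ===== CLAIM (what is proved, stated in full; the proofs are below) =====
def Claim_equal_list_to_dicts : Prop := ∀ (jobs : List String), Dom_list_to_dicts jobs → Pre_list_to_dicts jobs → Spec_list_to_dicts jobs (list_to_dicts jobs)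

-- ===== LEMMAS AND PROOFS =====

def emit (d : List (String × String)) : List (List (String × String)) :=
  if d = [] then [] else [d]

theorem goB_nil : goB [] = [] := by rw [goB]

theorem goB_cons_empty (xs : List String) : goB ("" :: xs) = goB xs := by
  rw [goB]; simp

theorem goB_cons_ne (y : String) (ys : List String) (hy : y ≠ "") :
    goB (y :: ys) = mkDictB (y :: ys.takeWhile notEmpty) :: goB (ys.dropWhile notEmpty) := by
  rw [goB]; simp [hy]

theorem tw_cons_ne (y : String) (ys : List String) (hy : y ≠ "") :
    (y :: ys).takeWhile notEmpty = y :: ys.takeWhile notEmpty := by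
  simp [notEmpty, hy]

theorem dw_cons_ne (y : String) (ys : List String) (hy : y ≠ "") :
    (y :: ys).dropWhile notEmpty = ys.dropWhile notEmpty := by
  simp [notEmpty, hy]

theorem tw_cons_empty (ys : List String) : ("" :: ys).takeWhile notEmpty = [] := by
  simp [notEmpty]

theorem dw_cons_empty (ys : List String) : ("" :: ys).dropWhile notEmpty = "" :: ys := by
  simp [notEmpty]

theorem dinsert_ne_nil (d : List (String × String)) (k v : String) : dinsert d k v ≠ [] := by
  unfold dinsert; split
  · next h =>
    intro hc
    rw [List.map_eq_nil_iff] at hc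
    subst hc; simp at h
  · simp

theorem foldl_dinsert_ne_nil (run : List String) (d : List (String × String)) (hd : d ≠ []) :
    run.foldl (fun d item => dinsert d (splitEq item).1 (splitEq item).2) d ≠ [] := by
  induction run generalizing d with
  | nil => exact hd
  | cons x xs ih => exact ih _ (dinsert_ne_nil _ _ _)

-- B's answer, read off from its own leading run
theorem goB_run (jobs : List String) :
    emit ((jobs.takeWhile notEmpty).foldl
            (fun d item => dinsert d (splitEq item).1 (splitEq item).2) [])
      ++ goB (jobs.dropWhile notEmpty) = goB jobs := by
  cases jobs with
  | nil => simp [emit]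
  | cons y ys =>
    by_cases hy : y = ""
    · subst hy
      rw [tw_cons_empty, dw_cons_empty]
      simp [emit]
    · rw [tw_cons_ne y ys hy, dw_cons_ne y ys hy, goB_cons_ne y ys hy]
      have hne := foldl_dinsert_ne_nil (ys.takeWhile notEmpty)
        (dinsert [] (splitEq y).1 (splitEq y).2) (dinsert_ne_nil _ _ _)
      simp only [List.foldl_cons]
      simp [emit, hne, mkDictB]

-- the emitted-dicts accumulator only ever grows at the back
theorem goA_append (dicts : List (List (String × String))) (cur : List (String × String))
    (jobs : List String) : goA dicts cur jobs = dicts ++ goA [] cur jobs := by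
  induction jobs generalizing dicts cur with
  | nil => by_cases h : cur = [] <;> simp [goA, h]
  | cons x xs ih =>
    simp only [goA]
    split
    · split
      · exact ih _ _
      · rw [ih (dicts ++ [cur]) [], ih ([] ++ [cur]) []]; simp
    · exact ih _ _

-- run-level characterisation of A's loop: the pending dict absorbs the leading non-empty run,
-- is emitted if non-empty, and the rest is B's answer
theorem goA_run (jobs : List String) : ∀ d : List (String × String),
    goA [] d jobs =
      emit ((jobs.takeWhile notEmpty).foldl
              (fun d item => dinsert d (splitEq item).1 (splitEq item).2) d)
        ++ goB (jobs.dropWhile notEmpty) := by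
  induction jobs with
  | nil =>
    intro d
    by_cases h : d = [] <;> simp [goA, emit, h, goB_nil]
  | cons x xs ih =>
    intro d
    by_cases hx : x = ""
    · subst hx
      have hxs : goA [] ([] : List (String × String)) xs = goB xs := by
        rw [ih [], goB_run xs]
      rw [tw_cons_empty, dw_cons_empty]
      by_cases hd : d = []
      · subst hd
        simp only [goA]
        rw [hxs, goB_cons_empty]
        simp [emit]
      · simp only [goA, if_neg hd]
        rw [goA_append, hxs, goB_cons_empty]
        simp [emit, hd]
    · rw [tw_cons_ne x xs hx, dw_cons_ne x xs hx]
      simp only [goA, if_neg hx]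
      rw [ih]
      simp

-- ===== VERDICT (by name: the statement is the Claim_ definition above) =====
theorem list_to_dicts_spec : Claim_equal_list_to_dicts := by
  intro jobs _ _
  unfold Spec_list_to_dicts list_to_dicts list_to_dicts_alt
  rw [goA_run jobs [], goB_run jobs]
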